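-- pv_equiv track=rewrite | github.com/pypi-data/pypi-mirror-396 | packages/ispider/ispider-0.7.4-py3-none-any.whl/ispider_core/utils/queues.py | spread_domains_balanced
-- ===== SOURCE A (Python) =====
-- from collections import defaultdict, deque, Counter
-- from heapq import heapify, heappop, heappush
--
-- def spread_domains_balanced(dom_list):
--     freq = Counter(dom_list)
--     heap = [(-cnt, dom) for dom, cnt in freq.items()]
--     heapify(heap)
--
--     prev = None
--     result = []
--
--     while heap:
--         cnt, dom = heappop(heap)
--         result.append(dom)
--         cnt += 1  # reduce magnitude
--
--         if prev:
--             heappush(heap, prev)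
--
--         prev = (cnt, dom) if cnt < 0 else None
--
--     return result
-- ===== SOURCE B (Python) =====
-- from collections import Counter
--
-- def spread_domains_balanced(dom_list):
--     # Greedy spread: repeatedly take the domain with the most remaining
--     # occurrences (ties by name) from a plain dict of remaining counts,
--     # holding the domain just emitted out of the pool for one round.
--     pool = dict(Counter(dom_list))
--     prev = None
--     result = []
--     while pool:
--         dom = min(pool, key=lambda d: (-pool[d], d))
--         cnt = pool.pop(dom)
--         result.append(dom)
--         if prev is not None:
--             pool[prev[0]] = prev[1]
--         prev = (dom, cnt - 1) if cnt > 1 else None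
--     return result
-- ===== Notes on version B (the rewrite author's own statement) =====
-- stated objective: simpler
-- what changed: Replaces the heapq priority queue of (-count, domain) pairs with a plain dict of remaining positive counts that is linearly scanned each round for the most frequent domain (ties by smallest name), popping it and re-inserting the held previous domain.
import Mathlib
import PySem

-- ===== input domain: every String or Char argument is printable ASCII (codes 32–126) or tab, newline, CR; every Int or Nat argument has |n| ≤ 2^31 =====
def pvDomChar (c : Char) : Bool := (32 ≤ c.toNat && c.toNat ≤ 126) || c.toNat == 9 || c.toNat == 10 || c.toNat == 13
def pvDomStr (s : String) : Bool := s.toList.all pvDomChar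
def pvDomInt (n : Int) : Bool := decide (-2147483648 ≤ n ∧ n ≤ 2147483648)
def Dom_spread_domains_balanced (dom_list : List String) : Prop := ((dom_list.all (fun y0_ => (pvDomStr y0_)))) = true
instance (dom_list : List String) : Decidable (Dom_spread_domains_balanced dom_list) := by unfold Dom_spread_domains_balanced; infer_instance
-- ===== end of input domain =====

-- B replaces A's heapq priority queue with a plain dict of remaining counts
-- scanned linearly for the most frequent domain each round (objective: simpler).


-- ===== PORT A =====
-- Python tuple comparison on (cnt, dom) is the lexicographic order Int ×ₗ String.
-- The heapq library calls are ported by their observable behaviour on the heap's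
-- contents: heapify = identity, heappop = remove THE least element (all heap
-- elements are distinct pairs, their second components being distinct dict keys,
-- so the least element is unique and the internal array layout is unobservable),
-- heappush = add an element.
def pyHeapPopMin (heap : List (Int × String)) : Option ((Int × String) × List (Int × String)) :=
  match PySem.List.min? heap (fun p => toLex p) with
  | none => none
  | some m => some (m, heap.erase m)

-- the while-loop of A; fuel dom_list.length + 1 bounds the iteration count
-- (each iteration lowers the total remaining multiplicity held in heap+prev by one)
def loopA : Nat → List (Int × String) → Option (Int × String) → List String → List String
  | 0, _, _, result => result
  | fuel+1, heap, prev, result =>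
    match pyHeapPopMin heap with
    | none => result
    | some (m, rest) =>
      let cnt := m.1 + 1
      let heap' := match prev with
        | some p => rest ++ [p]
        | none => rest
      loopA fuel heap' (if cnt < 0 then some (cnt, m.2) else none) (result ++ [m.2])

def spread_domains_balanced (dom_list : List String) : List String :=
  let freq := PySem.Dict.counter dom_list
  let heap := freq.items.map (fun p => (-p.2, p.1))
  loopA (dom_list.length + 1) heap none []

-- ===== PORT B =====
-- the while-loop of B; same fuel bound as A's loop
def loopB : Nat → PySem.Dict String Int → Option (String × Int) → List String → List String
  | 0, _, _, result => result
  | fuel+1, pool, prev, result =>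
    if pool.items.isEmpty then result
    else
      let dom := PySem.List.minD pool.keys (fun d => toLex (-(pool.getD d 0), d)) ""
      let cnt := pool.getD dom 0
      let pool' := pool.erase dom
      let pool'' := match prev with
        | some p => pool'.insert p.1 p.2
        | none => pool'
      loopB fuel pool'' (if cnt > 1 then some (dom, cnt - 1) else none) (result ++ [dom])

def spread_domains_balanced_alt (dom_list : List String) : List String :=
  loopB (dom_list.length + 1) (PySem.Dict.counter dom_list) none []

-- ===== PRECONDITION & SPEC =====
def Spec_spread_domains_balanced (dom_list : List String) (out : List String) : Prop := out = spread_domains_balanced_alt dom_list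
instance (dom_list : List String) (out : List String) : Decidable (Spec_spread_domains_balanced dom_list out) := by unfold Spec_spread_domains_balanced; infer_instance

-- ===== CLAIM (what is proved, stated in full; the proofs are below) =====
def Claim_equal_spread_domains_balanced : Prop := ∀ (dom_list : List String), Dom_spread_domains_balanced dom_list → Spec_spread_domains_balanced dom_list (spread_domains_balanced dom_list)

-- ===== LEMMAS AND PROOFS =====

def InvPrev (prevA : Option (Int × String)) (prevB : Option (String × Int)) (pool : PySem.Dict String Int) : Prop :=
  match prevA, prevB with
  | none, none => True
  | some p, some q => p.2 = q.1 ∧ p.1 = -q.2 ∧ pool.contains q.1 = false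
  | _, _ => False

theorem min?_aux {α κ : Type} [LinearOrder κ] (key : α → κ) :
    ∀ (l : List α) (a : α), ∃ m,
      (l.foldl (fun acc x => match acc with
        | none => some x
        | some mm => if key x < key mm then some x else some mm) (some a)) = some m ∧
      m ∈ a :: l ∧ ∀ x ∈ a :: l, key m ≤ key x := by
  intro l
  induction l with
  | nil => intro a; exact ⟨a, rfl, by simp, by simp⟩
  | cons x xs ih =>
    intro a
    by_cases hx : key x < key a
    · obtain ⟨m, h1, h2, h3⟩ := ih x
      refine ⟨m, by simpa [hx] using h1, ?_, ?_⟩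
      · rcases List.mem_cons.1 h2 with h | h <;> simp [h]
      · intro y hy
        rcases List.mem_cons.1 hy with h | hy'
        · subst h; exact le_trans (h3 x (by simp)) (le_of_lt hx)
        · exact h3 y hy'
    · obtain ⟨m, h1, h2, h3⟩ := ih a
      refine ⟨m, by simpa [hx] using h1, ?_, ?_⟩
      · rcases List.mem_cons.1 h2 with h | h <;> simp [h]
      · intro y hy
        rcases List.mem_cons.1 hy with h | hy'
        · subst h; exact h3 y (by simp)
        · rcases List.mem_cons.1 hy' with h | h
          · subst h; exact le_trans (h3 a (by simp)) (le_of_not_gt hx)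
          · exact h3 y (by simp [h])

theorem min?_cons {α κ : Type} [LinearOrder κ] (key : α → κ) (a : α) (l : List α) :
    ∃ m, PySem.List.min? (a :: l) key = some m ∧ m ∈ a :: l ∧ ∀ x ∈ a :: l, key m ≤ key x := by
  obtain ⟨m, h1, h2, h3⟩ := min?_aux key l a
  exact ⟨m, by simpa [PySem.List.min?] using h1, h2, h3⟩

theorem find?_of_mem_nodup (l : List (String × Int)) (k : String) (v : Int)
    (hnd : (l.map Prod.fst).Nodup) (h : (k, v) ∈ l) :
    l.find? (fun p => p.1 == k) = some (k, v) := by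
  induction l with
  | nil => simp at h
  | cons p ps ih =>
    simp only [List.map_cons, List.nodup_cons] at hnd
    rcases List.mem_cons.1 h with h | h
    · subst h; simp [List.find?]
    · have hne : ¬ (p.1 = k) := fun he =>
        hnd.1 (he ▸ (List.mem_map.2 ⟨(k, v), h, rfl⟩))
      rw [List.find?_cons_of_neg (by simpa using hne)]
      exact ih hnd.2 h

theorem filter_map_erase (l : List (String × Int)) (dom : String) (c : Int)
    (hnd : (l.map Prod.fst).Nodup) (h : (dom, c) ∈ l) :
    ((l.filter (fun p => !(p.1 == dom))).map (fun p => (-p.2, p.1))) =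
      ((l.map (fun p => (-p.2, p.1))).erase (-c, dom)) := by
  induction l with
  | nil => simp at h
  | cons p ps ih =>
    simp only [List.map_cons, List.nodup_cons] at hnd
    by_cases hp : p.1 = dom
    · have hpe : p = (dom, c) := by
        rcases List.mem_cons.1 h with h | h
        · exact h.symm
        · exact absurd (hp ▸ (List.mem_map.2 ⟨(dom, c), h, rfl⟩) : p.1 ∈ ps.map Prod.fst) hnd.1
      subst hpe
      simp only [List.filter_cons, List.map_cons]
      rw [List.erase_cons_head]
      have hall : ps.filter (fun p => !(p.1 == dom)) = ps := by
        apply List.filter_eq_self.2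
        intro q hq
        simp only [Bool.not_eq_eq_eq_not, Bool.not_true, beq_eq_false_iff_ne, ne_eq]
        intro he
        exact hnd.1 (he ▸ (List.mem_map.2 ⟨q, hq, rfl⟩))
      simp [hall]
    · have hmem : (dom, c) ∈ ps := by
        rcases List.mem_cons.1 h with h | h
        · exact absurd (congrArg Prod.fst h.symm) hp
        · exact h
      have hne : ((-p.2, p.1) : Int × String) ≠ (-c, dom) := by
        intro he; exact hp (congrArg Prod.snd he)
      simp only [List.filter_cons, List.map_cons]
      rw [List.erase_cons_tail (by simpa using hne)]
      simp [hp, ih hnd.2 hmem]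

theorem loop_eq (fuel : Nat) :
    ∀ (heap : List (Int × String)) (pool : PySem.Dict String Int)
      (prevA : Option (Int × String)) (prevB : Option (String × Int)) (res : List String),
      heap.Perm (pool.items.map (fun p => (-p.2, p.1))) →
      pool.keys.Nodup →
      InvPrev prevA prevB pool →
      loopA fuel heap prevA res = loopB fuel pool prevB res := by
  induction fuel with
  | zero => intro heap pool prevA prevB res _ _ _; rfl
  | succ fuel ih =>
    intro heap pool prevA prevB res hperm hnd hprev
    by_cases hemp : pool.items.isEmpty
    · have hitems : pool.items = [] := List.isEmpty_iff.1 hemp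
      have hheap : heap = [] := List.Perm.eq_nil (by simpa [hitems] using hperm)
      simp [loopA, loopB, pyHeapPopMin, PySem.List.min?, hemp, hheap]
    · -- nonempty
      have hitems_ne : pool.items ≠ [] := fun h => hemp (by simp [h])
      have hheap_ne : heap ≠ [] := by
        intro h
        exact hitems_ne (by simpa using (List.Perm.eq_nil (by simpa [h] using hperm.symm)))
      obtain ⟨h0, hs, rfl⟩ : ∃ h0 hs, heap = h0 :: hs := by
        cases heap with
        | nil => exact absurd rfl hheap_ne
        | cons a l => exact ⟨a, l, rfl⟩
      obtain ⟨m, hmin, hmem, hle⟩ := min?_cons (fun p => toLex p) h0 hs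
      have hpop : pyHeapPopMin (h0 :: hs) = some (m, (h0 :: hs).erase m) := by
        simp [pyHeapPopMin, hmin]
      -- B side selection
      have hkeys_ne : pool.keys ≠ [] := by
        intro h
        exact hitems_ne (List.map_eq_nil_iff.1 (h : pool.items.map Prod.fst = []))
      obtain ⟨k0, ks, hkeq⟩ : ∃ k0 ks, pool.keys = k0 :: ks := by
        cases hk : pool.keys with
        | nil => exact absurd hk hkeys_ne
        | cons a l => exact ⟨a, l, rfl⟩
      obtain ⟨domSel, hminB, hmemB, hleB⟩ :=
        min?_cons (fun d => toLex (-(pool.getD d 0), d)) k0 ks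
      have hminD : PySem.List.minD pool.keys (fun d => toLex (-(pool.getD d 0), d)) "" = domSel := by
        simp [PySem.List.minD, hkeq, hminB]
      have hmemB' : domSel ∈ pool.keys := by rw [hkeq]; exact hmemB
      have hleB' : ∀ d ∈ pool.keys, (toLex (-(pool.getD domSel 0), domSel)) ≤ toLex (-(pool.getD d 0), d) := by
        rw [hkeq]; exact hleB
      -- getD of a member key
      have hgetD : ∀ p ∈ pool.items, pool.getD p.1 0 = p.2 := by
        intro p hp
        have := find?_of_mem_nodup pool.items p.1 p.2 hnd hp
        simp [PySem.Dict.getD, PySem.Dict.get?, this]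
      -- the two key images coincide
      have hmapeq : pool.keys.map (fun d => toLex (-(pool.getD d 0), d)) =
          pool.items.map (fun p => toLex (-p.2, p.1)) := by
        show (pool.items.map Prod.fst).map (fun d => toLex (-(pool.getD d 0), d)) = _
        rw [List.map_map]
        exact List.map_congr_left (fun p hp => by simp [hgetD p hp])
      have hmap2 : ((h0 :: hs).map (fun p => toLex p)).Perm
          (pool.items.map (fun p => toLex (-p.2, p.1))) := by
        have := hperm.map (fun p => toLex p)
        simpa [List.map_map, Function.comp] using this
      -- key equality
      have hkeyeq : (toLex (-(pool.getD domSel 0), domSel)) = toLex m := by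
        apply le_antisymm
        · have : toLex m ∈ pool.keys.map (fun d => toLex (-(pool.getD d 0), d)) := by
            rw [hmapeq]
            exact hmap2.mem_iff.1 (List.mem_map.2 ⟨m, hmem, rfl⟩)
          obtain ⟨d0, hd0, he⟩ := List.mem_map.1 this
          exact he ▸ hleB' d0 hd0
        · have : (toLex (-(pool.getD domSel 0), domSel)) ∈ (h0 :: hs).map (fun p => toLex p) := by
            rw [List.Perm.mem_iff hmap2, ← hmapeq]
            exact List.mem_map.2 ⟨domSel, hmemB', rfl⟩
          obtain ⟨x, hx, he⟩ := List.mem_map.1 this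
          exact he ▸ hle x hx
      have hpair : ((-(pool.getD domSel 0), domSel) : Int × String) = m := hkeyeq
      have hdom : m.2 = domSel := by rw [← hpair]
      have hcnt : pool.getD domSel 0 = -m.1 := by
        have := congrArg Prod.fst hpair; simp at this; omega
      -- the selected pair is in items
      have hitem : (domSel, -m.1) ∈ pool.items := by
        obtain ⟨p, hp, hpe⟩ := List.mem_map.1 (hmemB' : domSel ∈ pool.items.map Prod.fst)
        have hpv : p.2 = -m.1 := by rw [← hcnt, ← hpe]; exact (hgetD p hp).symm
        have hpp : p = (domSel, -m.1) := by
          cases p; simp_all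
        exact hpp ▸ hp
      -- erase correspondence
      have hperm' : ((h0 :: hs).erase m).Perm
          ((pool.erase domSel).items.map (fun p => (-p.2, p.1))) := by
        have he := filter_map_erase pool.items domSel (-m.1) hnd hitem
        have : (pool.erase domSel).items = pool.items.filter (fun p => !(p.1 == domSel)) := rfl
        rw [this, he]
        have : ((-(-m.1), domSel) : Int × String) = m := by
          rw [neg_neg, ← hdom]
        rw [this]
        exact hperm.erase m
      -- nodup of erased keys
      have hnd' : (pool.erase domSel).keys.Nodup := by
        have : (pool.erase domSel).keys.Sublist pool.keys := by
          show ((pool.items.filter _).map Prod.fst).Sublist (pool.items.map Prod.fst)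
          exact List.Sublist.map _ List.filter_sublist
        exact List.Nodup.sublist this hnd
      -- erased pool does not contain domSel
      have hnc : (pool.erase domSel).contains domSel = false := by
        simp [PySem.Dict.erase, PySem.Dict.contains, List.any_filter]
      -- domSel is a key of pool
      have hcontDom : pool.contains domSel = true := by
        simp only [PySem.Dict.contains, List.any_eq_true]
        exact ⟨(domSel, -m.1), hitem, by simp⟩
      -- unfold one step of both loops
      have hempf : pool.items.isEmpty = false := by simpa using hemp
      simp only [loopA, hpop]
      simp only [loopB, hempf, Bool.false_eq_true, if_false, hminD, hcnt]
      simp only [hdom]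
      cases prevA with
      | none =>
        cases prevB with
        | some q => exact hprev.elim
        | none =>
          by_cases hc0 : m.1 + 1 < 0
          · rw [if_pos hc0, if_pos (by omega : (-m.1 : Int) > 1)]
            exact ih _ _ _ _ _ hperm' hnd' ⟨rfl, by omega, hnc⟩
          · rw [if_neg hc0, if_neg (by omega : ¬ ((-m.1 : Int) > 1))]
            exact ih _ _ _ _ _ hperm' hnd' trivial
      | some p =>
        cases prevB with
        | none => exact hprev.elim
        | some q =>
          obtain ⟨h1, h2, h3⟩ := hprev
          have hq' : (pool.erase domSel).contains q.1 = false := by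
            simp only [PySem.Dict.contains, PySem.Dict.erase] at h3 ⊢
            rw [List.any_eq_false] at h3 ⊢
            intro r hr
            exact h3 r (List.mem_of_mem_filter hr)
          have hins : ((pool.erase domSel).insert q.1 q.2).items =
              (pool.erase domSel).items ++ [(q.1, q.2)] := by
            simp [PySem.Dict.insert, hq']
          have hpq : p = (-q.2, q.1) := by
            cases p; cases q; simp_all
          have hdq : q.1 ≠ domSel := by
            intro he
            rw [he] at h3
            rw [h3] at hcontDom
            exact Bool.false_ne_true hcontDom
          have hpermI : (((h0 :: hs).erase m) ++ [p]).Perm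
              ((((pool.erase domSel).insert q.1 q.2).items).map (fun r => (-r.2, r.1))) := by
            rw [hins, List.map_append]
            exact List.Perm.append hperm' (by simp [hpq])
          have hq_nmem : q.1 ∉ (pool.erase domSel).items.map Prod.fst := by
            intro hmm
            obtain ⟨r, hr, hre⟩ := List.mem_map.1 hmm
            have : (pool.erase domSel).contains q.1 = true := by
              simp only [PySem.Dict.contains, List.any_eq_true]
              exact ⟨r, hr, by simp [hre]⟩
            rw [this] at hq'
            exact Bool.noConfusion hq'
          have hndI : (((pool.erase domSel).insert q.1 q.2)).keys.Nodup := by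
            show ((((pool.erase domSel).insert q.1 q.2)).items.map Prod.fst).Nodup
            rw [hins, List.map_append]
            simp only [List.map_cons, List.map_nil]
            rw [List.nodup_append]
            refine ⟨hnd', List.nodup_singleton _, ?_⟩
            intro x hx
            simp only [List.mem_singleton]
            rintro he rfl hxe
            exact hq_nmem (hxe ▸ hx)
          have hncI : (((pool.erase domSel).insert q.1 q.2)).contains domSel = false := by
            simp only [PySem.Dict.contains, hins, List.any_append]
            rw [show ((pool.erase domSel).items.any fun r => r.1 == domSel) = false from hnc]
            simp [hdq]
          by_cases hc0 : m.1 + 1 < 0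
          · rw [if_pos hc0, if_pos (by omega : (-m.1 : Int) > 1)]
            exact ih _ _ _ _ _ hpermI hndI ⟨rfl, by omega, hncI⟩
          · rw [if_neg hc0, if_neg (by omega : ¬ ((-m.1 : Int) > 1))]
            exact ih _ _ _ _ _ hpermI hndI trivial

-- ===== VERDICT (by name: the statement is the Claim_ definition above) =====
theorem spread_domains_balanced_spec : Claim_equal_spread_domains_balanced := by
  intro dom_list _
  unfold Spec_spread_domains_balanced spread_domains_balanced spread_domains_balanced_alt
  exact loop_eq _ _ _ _ _ _ (List.Perm.refl _)
    (by simp) trivial
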